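-- pv_equiv track=rewrite | github.com/fictionalflaw/MMleo | agent/custom/action/composite_game_mini.py | to_chessboard
-- ===== SOURCE A (Python) =====
-- def to_chessboard(box):
--     """映射box到棋盘位置
--     Args:
--         box
--     Returns:
--         row_idx,col_idx
--     """
--     # 计算每个单元格的Y坐标(行)和X坐标(列)
--     cell_height = 519 // 5
--     cell_width = 724 // 7
--
--     ROW_Y = [40 + i * cell_height + cell_height // 2 for i in range(5)]
--     COL_X = [330 + j * cell_width + cell_width // 2 for j in range(7)]
--
--     x, y, w, h = box
--
--         # 行列索引查找逻辑
--     row_idx = next(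
--         (
--             i
--             for i, ry in enumerate(ROW_Y)
--             if ry - cell_height // 2 <= y+h//2 <= ry + cell_height // 2
--         ),
--         None,
--     )
--     col_idx = next(
--         (
--             i
--             for i, cx in enumerate(COL_X)
--             if cx - cell_width // 2 <= x+h//2 <= cx + cell_width // 2
--         ),
--         None,
--     )
--         #candidate_list=[]
--     if row_idx is not None and col_idx is not None:
--         return row_idx,col_idx#第row行，第col列
-- ===== SOURCE B (Python) =====
-- def to_chessboard(box):
--     """映射box到棋盘位置 -- direct arithmetic instead of scanning a centers table."""
--     x, y, w, h = box
--     cell = 103  # 519 // 5 == 724 // 7 == 103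
--     v = y + h // 2 - 40
--     row_idx = v // cell if 0 <= v < 5 * cell else None
--     v2 = x + h // 2 - 330  # keeps A's use of h//2 for the column
--     col_idx = v2 // cell if 0 <= v2 < 7 * cell else None
--     if row_idx is not None and col_idx is not None:
--         return row_idx, col_idx
-- ===== Notes on version B (the rewrite author's own statement) =====
-- stated objective: simpler
-- what changed: Replaces the ROW_Y/COL_X centers tables and the two next(...) linear scans with direct arithmetic: offset the center by the grid origin and divide by the 103-pixel cell size, guarded by range checks.
import Mathlib
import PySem

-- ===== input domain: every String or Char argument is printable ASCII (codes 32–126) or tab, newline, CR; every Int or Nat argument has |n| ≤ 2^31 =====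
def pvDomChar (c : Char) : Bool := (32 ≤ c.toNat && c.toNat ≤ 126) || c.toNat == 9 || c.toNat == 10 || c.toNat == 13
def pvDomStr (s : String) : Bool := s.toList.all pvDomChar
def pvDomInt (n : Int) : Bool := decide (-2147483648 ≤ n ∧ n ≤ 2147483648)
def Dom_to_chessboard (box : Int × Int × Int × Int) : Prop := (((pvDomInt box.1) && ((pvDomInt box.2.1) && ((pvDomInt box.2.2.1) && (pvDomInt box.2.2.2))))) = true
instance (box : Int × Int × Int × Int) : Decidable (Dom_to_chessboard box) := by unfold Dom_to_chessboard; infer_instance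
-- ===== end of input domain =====

-- B replaces the centers tables and the next(...) scans by direct O(1) arithmetic (offset // cell with range guards); objective: simpler.

-- ===== PORT A =====
def to_chessboard (box : Int × Int × Int × Int) : Option (Int × Int) :=
  let cellHeight : Int := PySem.Int.floordiv 519 5
  let cellWidth : Int := PySem.Int.floordiv 724 7
  let rowY : List Int :=
    (PySem.List.pyRange 0 5 1).map (fun i => 40 + i * cellHeight + PySem.Int.floordiv cellHeight 2)
  let colX : List Int :=
    (PySem.List.pyRange 0 7 1).map (fun j => 330 + j * cellWidth + PySem.Int.floordiv cellWidth 2)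
  match box with
  | (x, y, _w, h) =>
    let rowIdx : Option Int :=
      (PySem.List.enumerate rowY).findSome? (fun p =>
        if p.2 - PySem.Int.floordiv cellHeight 2 ≤ y + PySem.Int.floordiv h 2 ∧
           y + PySem.Int.floordiv h 2 ≤ p.2 + PySem.Int.floordiv cellHeight 2
        then some p.1 else none)
    let colIdx : Option Int :=
      (PySem.List.enumerate colX).findSome? (fun p =>
        if p.2 - PySem.Int.floordiv cellWidth 2 ≤ x + PySem.Int.floordiv h 2 ∧
           x + PySem.Int.floordiv h 2 ≤ p.2 + PySem.Int.floordiv cellWidth 2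
        then some p.1 else none)
    match rowIdx, colIdx with
    | some r, some c => some (r, c)
    | _, _ => none

-- ===== PORT B =====
def to_chessboard_alt (box : Int × Int × Int × Int) : Option (Int × Int) :=
  let x := box.1
  let y := box.2.1
  let h := box.2.2.2
  let cell : Int := 103
  let v : Int := y + PySem.Int.floordiv h 2 - 40
  let rowIdx : Option Int :=
    if 0 ≤ v ∧ v < 5 * cell then some (PySem.Int.floordiv v cell) else none
  let v2 : Int := x + PySem.Int.floordiv h 2 - 330
  let colIdx : Option Int :=
    if 0 ≤ v2 ∧ v2 < 7 * cell then some (PySem.Int.floordiv v2 cell) else none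
  if rowIdx.isSome && colIdx.isSome then some (rowIdx.get!, colIdx.get!) else none

-- ===== PRECONDITION & SPEC =====
def Spec_to_chessboard (box : Int × Int × Int × Int) (out : Option (Int × Int)) : Prop := out = to_chessboard_alt box
instance (box : Int × Int × Int × Int) (out : Option (Int × Int)) : Decidable (Spec_to_chessboard box out) := by unfold Spec_to_chessboard; infer_instance

-- ===== CLAIM (what is proved, stated in full; the proofs are below) =====
def Claim_equal_to_chessboard : Prop := ∀ (box : Int × Int × Int × Int), Dom_to_chessboard box → Spec_to_chessboard box (to_chessboard box)

-- ===== LEMMAS AND PROOFS =====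

-- A's scan over the 5 row centers equals the arithmetic index into 103-pixel cells
theorem rowscan5 (v : Int) :
    ((PySem.List.enumerate ([91, 194, 297, 400, 503] : List Int)).findSome?
      (fun p => if p.2 - 51 ≤ v ∧ v ≤ p.2 + 51 then some p.1 else none))
    = if 0 ≤ v - 40 ∧ v - 40 < 5 * 103 then some ((v - 40) / 103) else none := by
  simp only [PySem.List.enumerate, List.findSome?]
  norm_num
  split_ifs <;> first | rfl | (simp only [Option.some.injEq]; omega) | omega

-- A's scan over the 7 column centers equals the arithmetic index into 103-pixel cells
theorem colscan7 (v : Int) :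
    ((PySem.List.enumerate ([381, 484, 587, 690, 793, 896, 999] : List Int)).findSome?
      (fun p => if p.2 - 51 ≤ v ∧ v ≤ p.2 + 51 then some p.1 else none))
    = if 0 ≤ v - 330 ∧ v - 330 < 7 * 103 then some ((v - 330) / 103) else none := by
  simp only [PySem.List.enumerate, List.findSome?]
  norm_num
  split_ifs <;> first | rfl | (simp only [Option.some.injEq]; omega) | omega

-- ===== VERDICT (by name: the statement is the Claim_ definition above) =====
theorem to_chessboard_spec : Claim_equal_to_chessboard := by
  rintro ⟨x, y, w, h⟩ _
  show to_chessboard (x, y, w, h) = to_chessboard_alt (x, y, w, h)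
  have h1 : PySem.Int.floordiv 519 5 = 103 := by decide
  have h2 : PySem.Int.floordiv 724 7 = 103 := by decide
  have h3 : PySem.Int.floordiv 103 2 = 51 := by decide
  have hr5 : (PySem.List.pyRange 0 5 1).map (fun i => 40 + i * 103 + 51)
      = [91, 194, 297, 400, 503] := by decide
  have hc7 : (PySem.List.pyRange 0 7 1).map (fun j => 330 + j * 103 + 51)
      = [381, 484, 587, 690, 793, 896, 999] := by decide
  have hfd : ∀ a : Int, PySem.Int.floordiv a 103 = a / 103 :=
    fun a => PySem.Int.floordiv_eq_ediv_of_pos (by norm_num)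
  simp only [to_chessboard, to_chessboard_alt, h1, h2, h3, hr5, hc7, hfd,
    rowscan5, colscan7]
  split_ifs <;> simp_all
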